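-- pv_equiv track=rewrite | github.com/TheMasterGame0/Project-NLP | Atividade_2/Bigram.py | bigramPairs
-- ===== SOURCE A (Python) =====
-- def bigramPairs(ids):
--   dic = {}
--   sentence = ids
--   for pair in zip (sentence, sentence[1:]):
--     # Increase the number of repeats of some pair in text
--     # The .get take back the value on dict ou return the default value (0)
--     dic[pair] = dic.get(pair, 0) + 1
--
--   if dic != {}:
--     temp = sorted(dic.items(), key = lambda x: -x[1])[0]
--     return temp[0]
--   else:
--     return (256, 257)
-- ===== SOURCE B (Python) =====
-- def bigramPairs(ids):
--   # Different decomposition: materialise the adjacent-pair list, walk its unique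
--   # pairs in first-occurrence order and rescan with .count, keeping the best on
--   # strict improvement (so the earliest-seen pair wins ties, as A's stable sort does).
--   pairs = list(zip(ids, ids[1:]))
--   best = None
--   bestc = 0
--   for p in dict.fromkeys(pairs):
--     c = pairs.count(p)
--     if c > bestc:
--       best, bestc = p, c
--   return best if best is not None else (256, 257)
-- ===== Notes on version B (the rewrite author's own statement) =====
-- stated objective: alternative
-- what changed: A builds a frequency dict in one pass and stably sorts all its items by descending count to take the top; B materialises the adjacent-pair list, walks its unique pairs in first-occurrence order and rescans the pair list with count for each, keeping a running best replaced only on strict improvement (so ties resolve identically), with no dict of counts and no sort.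
import Mathlib
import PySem

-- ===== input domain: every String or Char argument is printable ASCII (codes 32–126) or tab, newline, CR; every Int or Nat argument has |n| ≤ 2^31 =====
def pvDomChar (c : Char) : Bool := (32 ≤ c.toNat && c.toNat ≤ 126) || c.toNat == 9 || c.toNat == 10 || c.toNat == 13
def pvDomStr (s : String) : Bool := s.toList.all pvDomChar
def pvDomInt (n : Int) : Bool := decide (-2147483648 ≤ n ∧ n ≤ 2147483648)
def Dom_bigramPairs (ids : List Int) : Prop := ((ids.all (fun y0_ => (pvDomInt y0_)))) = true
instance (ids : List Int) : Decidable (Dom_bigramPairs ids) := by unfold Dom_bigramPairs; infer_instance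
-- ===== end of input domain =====

-- B replaces A's one-pass dict counting + full stable sort by a dedup/rescan
-- scan with a strict-improvement running best (objective: alternative decomposition, not faster).

-- ===== PORT A =====
def bigramPairs (ids : List Int) : List Int :=
  let sentence := ids
  let dic : PySem.Dict (Int × Int) Int :=
    (sentence.zip (PySem.List.slice sentence (some 1) none)).foldl
      (fun d pair => d.insert pair (d.getD pair 0 + 1)) PySem.Dict.empty
  if dic.items ≠ [] then  -- 'dic != {}': the dict is nonempty
    -- 'sorted(dic.items(), key=lambda x: -x[1])[0]' — the [0] is guarded by the nonemptiness test
    let temp := (PySem.List.sorted dic.items (fun x => -x.2) false).headI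
    [temp.1.1, temp.1.2]
  else
    [256, 257]

-- ===== PORT B =====
def bigramPairs_alt (ids : List Int) : List Int :=
  let pairs := ids.zip (PySem.List.slice ids (some 1) none)
  let r := (PySem.List.dedup pairs).foldl
    (fun (st : Option (Int × Int) × Int) p =>
      let c : Int := (PySem.List.count pairs p : Int)
      if c > st.2 then (some p, c) else st)
    (none, 0)
  match r.1 with
  | some p => [p.1, p.2]
  | none => [256, 257]

-- ===== PRECONDITION & SPEC =====
def Spec_bigramPairs (ids : List Int) (out : List Int) : Prop := out = bigramPairs_alt ids
instance (ids : List Int) (out : List Int) : Decidable (Spec_bigramPairs ids out) := by unfold Spec_bigramPairs; infer_instance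

-- ===== CLAIM (what is proved, stated in full; the proofs are below) =====
def Claim_equal_bigramPairs : Prop := ∀ (ids : List Int), Dom_bigramPairs ids → Spec_bigramPairs ids (bigramPairs ids)

-- ===== LEMMAS AND PROOFS =====

-- head of Python's stable sort is the FIRST minimal element, i.e. min?
theorem head_sorted_eq_min? {α κ : Type} [LinearOrder κ] (xs : List α) (key : α → κ) :
    (PySem.List.sorted xs key false).head? = PySem.List.min? xs key := by
  induction xs using List.reverseRecOn with
  | nil => simp [PySem.List.sorted, PySem.List.min?]
  | append_singleton xs x ih =>
    rw [PySem.List.sorted_eq_foldl_insertBy, List.foldl_append] at *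
    simp only [PySem.List.min?, List.foldl_append, List.foldl_cons, List.foldl_nil] at *
    cases h : List.foldl (fun acc x => PySem.List.insertBy (fun a b => decide (key a < key b)) x acc) [] xs with
    | nil =>
      rw [h] at ih
      simp [PySem.List.insertBy, ← ih]
    | cons y t =>
      rw [h] at ih
      simp only [List.head?] at ih
      rw [← ih]
      simp only [PySem.List.insertBy]
      split_ifs with hb <;> simp_all

-- B's strict-improvement fold over the unique pairs computes min? of the (pair, count) items
-- B's strict-improvement fold over the unique pairs computes min? of the (pair, count) items
theorem foldB_eq_min? (pairs : List (Int × Int)) (u : List (Int × Int))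
    (hpos : ∀ p ∈ u, 1 ≤ (PySem.List.count pairs p : Int)) (a? : Option (Int × Int)) :
    u.foldl
      (fun (st : Option (Int × Int) × Int) p =>
        let c : Int := (PySem.List.count pairs p : Int)
        if c > st.2 then (some p, c) else st)
      (a?.elim (none, 0) (fun q => (some q, (PySem.List.count pairs q : Int))))
    = ((u.map (fun p => (p, (PySem.List.count pairs p : Int)))).foldl
        (fun acc x =>
          match acc with
          | none => some x
          | some m => if (-x.2 : Int) < -m.2 then some x else some m)
        (a?.map (fun q => (q, (PySem.List.count pairs q : Int))))).elim
        (none, 0) (fun m => (some m.1, m.2)) := by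
  induction u generalizing a? with
  | nil => cases a? <;> rfl
  | cons p u ih =>
    have hp := hpos p (List.mem_cons_self ..)
    simp only [List.foldl_cons, List.map_cons]
    cases a? with
    | none =>
      have h0 : p ∈ pairs := by
        simp only [PySem.List.count] at hp
        exact List.count_pos_iff.mp (by omega)
      simpa [h0] using ih (fun q hq => hpos q (List.mem_cons_of_mem _ hq)) (some p)
    | some q =>
      by_cases hc : List.count q pairs < List.count p pairs
      · simpa [hc] using ih (fun r hr => hpos r (List.mem_cons_of_mem _ hr)) (some p)
      · simpa [hc] using ih (fun r hr => hpos r (List.mem_cons_of_mem _ hr)) (some q)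

-- ===== VERDICT (by name: the statement is the Claim_ definition above) =====
theorem bigramPairs_spec : Claim_equal_bigramPairs := by
  intro ids _
  unfold Spec_bigramPairs bigramPairs bigramPairs_alt
  simp only [PySem.Dict.foldl_insert_getD_add_one_eq_counter, PySem.Dict.items_counter,
    PySem.List.dedup_eq_ofList]
  set pairs := ids.zip (PySem.List.slice ids (some 1) none) with hpdef
  have hpos : ∀ p ∈ PySem.Set.ofList pairs, 1 ≤ (PySem.List.count pairs p : Int) := by
    intro p hp
    have : p ∈ pairs := (PySem.Set.mem_ofList pairs p).mp hp
    have := List.count_pos_iff.mpr this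
    simp only [PySem.List.count]
    omega
  have hfold := foldB_eq_min? pairs (PySem.Set.ofList pairs) hpos none
  simp only [Option.elim_none, Option.map_none] at hfold
  rw [hfold]
  have hmin : ((PySem.Set.ofList pairs).map
        (fun p => (p, (PySem.List.count pairs p : Int)))).foldl
      (fun acc x =>
        match acc with
        | none => some x
        | some m => if (-x.2 : Int) < -m.2 then some x else some m)
      none
      = PySem.List.min? ((PySem.Set.ofList pairs).map
          (fun p => (p, (PySem.List.count pairs p : Int)))) (fun x => (-x.2 : Int)) := by
    unfold PySem.List.min?
    congr 1
    funext acc x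
    cases acc <;> rfl
  rw [hmin, ← head_sorted_eq_min?]
  simp only [PySem.List.count] at *
  cases hs : PySem.List.sorted ((PySem.Set.ofList pairs).map
      (fun k => (k, (List.count k pairs : Int)))) (fun x => (-x.2 : Int)) false with
  | nil =>
    have hu : PySem.Set.ofList pairs = [] :=
      List.map_eq_nil_iff.mp ((PySem.List.sorted_eq_nil_iff _ _ _).mp hs)
    simp [hu]
  | cons y t =>
    have hne : ¬ PySem.Set.ofList pairs = [] := by
      intro h
      rw [h] at hs
      simp [PySem.List.sorted] at hs
    simp [hne]
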